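-- pv_equiv track=rewrite | github.com/Stonewater-Digital/snowdrop-mcp | skills/anomaly/transaction_anomaly_flagger.py | _summarize_risk
-- ===== SOURCE A (Python) =====
-- from typing import Any
--
-- def _summarize_risk(flagged: list[dict[str, Any]]) -> str:
--     if not flagged:
--         return "No anomalies detected."
--     reason_counts: dict[str, int] = {}
--     for entry in flagged:
--         for reason in entry.get("reasons", []):
--             reason_counts[reason] = reason_counts.get(reason, 0) + 1
--     parts = [f"{reason}: {count}" for reason, count in sorted(reason_counts.items())]
--     return ", ".join(parts)
-- ===== SOURCE B (Python) =====
-- def _summarize_risk(flagged: list) -> str: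
--     if not flagged:
--         return "No anomalies detected."
--     reasons = sorted(r for entry in flagged for r in entry.get("reasons", []))
--     parts = []
--     i, n = 0, len(reasons)
--     while i < n:
--         j = i + 1
--         while j < n and reasons[j] == reasons[i]:
--             j += 1
--         parts.append(f"{reasons[i]}: {j - i}")
--         i = j
--     return ", ".join(parts)
-- ===== Notes on version B (the rewrite author's own statement) =====
-- stated objective: alternative
-- what changed: Replaces the dict-based reason counting (hash map of counts, then sorted(items)) by a sort-then-scan pass: flatten all reasons, sort them once, and emit 'reason: run-length' for each maximal run of equal neighbours.
import Mathlib
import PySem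

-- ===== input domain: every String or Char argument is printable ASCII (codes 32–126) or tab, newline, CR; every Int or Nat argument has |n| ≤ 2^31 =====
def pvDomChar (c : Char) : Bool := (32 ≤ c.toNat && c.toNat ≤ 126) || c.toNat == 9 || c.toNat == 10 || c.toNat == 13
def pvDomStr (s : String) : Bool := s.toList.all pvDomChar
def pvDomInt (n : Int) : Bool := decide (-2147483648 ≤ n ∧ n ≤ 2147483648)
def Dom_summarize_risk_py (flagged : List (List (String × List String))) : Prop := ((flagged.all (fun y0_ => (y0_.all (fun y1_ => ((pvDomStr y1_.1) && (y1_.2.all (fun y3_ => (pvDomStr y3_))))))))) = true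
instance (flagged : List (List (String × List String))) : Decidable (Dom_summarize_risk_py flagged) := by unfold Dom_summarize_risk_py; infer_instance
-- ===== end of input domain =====

-- B replaces A's dict-based counting + sorted(items) by a single sort of the flattened
-- reason list followed by a run-length scan; same result, no speed claim (alternative).

-- ===== PORT A =====
-- for entry in flagged: for reason in entry.get("reasons", []): counts[reason] = counts.get(reason, 0) + 1
def summarize_risk_py (flagged : List (List (String × List String))) : String :=
  if flagged = [] then "No anomalies detected."
  else
    let reason_counts : PySem.Dict String Int :=
      flagged.foldl
        (fun d entry =>
          ((PySem.Dict.mk entry).getD "reasons" []).foldl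
            (fun d reason => d.insert reason (d.getD reason 0 + 1)) d)
        PySem.Dict.empty
    let parts :=
      (PySem.List.sorted2 reason_counts.items Prod.fst Prod.snd).map
        (fun p => p.1 ++ ": " ++ PySem.Int.toStr p.2)
    PySem.Str.join ", " parts

-- ===== PORT B =====
-- the run-length scan of Source B's while loops: j - i = 1 + length of the block of
-- neighbours equal to reasons[i]; advancing i to j = dropping that block
def pvEmitRuns : List String → List String
  | [] => []
  | r :: rest =>
      (r ++ ": " ++ PySem.Int.toStr ((1 + (rest.takeWhile (fun x => x == r)).length : Nat) : Int))
        :: pvEmitRuns (rest.dropWhile (fun x => x == r))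
termination_by l => l.length
decreasing_by
  simp only [List.length_cons]
  exact Nat.lt_succ_of_le (List.length_dropWhile_le _ _)

def summarize_risk_py_alt (flagged : List (List (String × List String))) : String :=
  if flagged = [] then "No anomalies detected."
  else
    let reasons :=
      PySem.List.sorted
        (flagged.flatMap (fun entry => (PySem.Dict.mk entry).getD "reasons" []))
        (fun r => r)
    PySem.Str.join ", " (pvEmitRuns reasons)

-- ===== PRECONDITION & SPEC =====
def Spec_summarize_risk_py (flagged : List (List (String × List String))) (out : String) : Prop := out = summarize_risk_py_alt flagged
instance (flagged : List (List (String × List String))) (out : String) : Decidable (Spec_summarize_risk_py flagged out) := by unfold Spec_summarize_risk_py; infer_instance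

-- ===== CLAIM (what is proved, stated in full; the proofs are below) =====
def Claim_equal_summarize_risk_py : Prop := ∀ (flagged : List (List (String × List String))), Dom_summarize_risk_py flagged → Spec_summarize_risk_py flagged (summarize_risk_py flagged)

-- ===== LEMMAS AND PROOFS =====

-- insertBy with two comparison functions that agree on the inserted element vs the list
theorem pv_insertBy_congr {α : Type} (b₁ b₂ : α → α → Bool) (x : α) :
    ∀ (acc : List α), (∀ y ∈ acc, b₁ x y = b₂ x y) →
      PySem.List.insertBy b₁ x acc = PySem.List.insertBy b₂ x acc := by
  intro acc
  induction acc with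
  | nil => intro _; rfl
  | cons y ys ih =>
      intro h
      simp only [PySem.List.insertBy]
      rw [h y (List.mem_cons_self ..)]
      by_cases hb : b₂ x y = true
      · simp [hb]
      · simp only [hb]
        rw [ih (fun z hz => h z (List.mem_cons_of_mem _ hz))]

-- the insertion-sort fold with two comparison functions agreeing on all pairs drawn from S
theorem pv_foldl_insertBy_congr {α : Type} (b₁ b₂ : α → α → Bool) (S : List α)
    (hagree : ∀ a ∈ S, ∀ y ∈ S, b₁ a y = b₂ a y) :
    ∀ (xs acc : List α), (∀ a ∈ xs, a ∈ S) → (∀ y ∈ acc, y ∈ S) →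
      xs.foldl (fun acc x => PySem.List.insertBy b₁ x acc) acc
        = xs.foldl (fun acc x => PySem.List.insertBy b₂ x acc) acc := by
  intro xs
  induction xs with
  | nil => intro _ _ _; rfl
  | cons x xs ih =>
      intro acc hxs hacc
      have hx : x ∈ S := hxs x (List.mem_cons_self ..)
      simp only [List.foldl_cons]
      rw [pv_insertBy_congr b₁ b₂ x acc (fun y hy => hagree x hx y (hacc y hy))]
      exact ih _ (fun a ha => hxs a (List.mem_cons_of_mem _ ha))
        (fun y hy => ((PySem.List.mem_insertBy ..).mp hy).elim (fun h => h ▸ hx) (hacc y))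

-- sorted(items) with the tuple key collapses to sorting by the first component
-- when equal fst forces equal pairs (distinct dict keys)
theorem pv_sorted2_eq_sorted_fst (xs : List (String × Int))
    (hinj : ∀ a ∈ xs, ∀ b ∈ xs, a.1 = b.1 → a = b) :
    PySem.List.sorted2 xs Prod.fst Prod.snd = PySem.List.sorted xs Prod.fst := by
  rw [PySem.List.sorted_eq_foldl_insertBy]
  simp only [PySem.List.sorted2]
  apply pv_foldl_insertBy_congr _ _ xs _ xs [] (fun a ha => ha) (by simp)
  intro a ha b hb
  rcases lt_trichotomy a.1 b.1 with h | h | h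
  · simp [h]
  · have hab : a = b := hinj a ha b hb h
    subst hab
    simp
  · simp [h, not_lt_of_gt h]

-- past the leading block of r's of a sorted-from-r list, every element differs from r
theorem pv_dropWhile_ne {rest : List String} {r : String}
    (hge : ∀ x ∈ rest, r ≤ x) (hp : rest.Pairwise (· ≤ ·)) :
    ∀ x ∈ rest.dropWhile (fun x => x == r), x ≠ r := by
  induction rest with
  | nil => simp
  | cons y t ih =>
      intro x hx
      by_cases hy : (y == r) = true
      · rw [List.dropWhile_cons, if_pos hy] at hx
        exact ih (fun z hz => hge z (List.mem_cons_of_mem _ hz)) (List.Pairwise.of_cons hp) x hx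
      · rw [List.dropWhile_cons, if_neg hy] at hx
        have hyr : y ≠ r := by simpa using hy
        have hry : r < y := lt_of_le_of_ne (hge y (List.mem_cons_self ..)) (Ne.symm hyr)
        rcases List.mem_cons.mp hx with h | h
        · exact h ▸ hyr
        · have : y ≤ x := (List.pairwise_cons.mp hp).1 x h
          exact ne_of_gt (lt_of_lt_of_le hry this)

-- every element of the leading block equals r
theorem pv_takeWhile_eq {rest : List String} {r : String} :
    ∀ x ∈ rest.takeWhile (fun x => x == r), x = r := by
  intro x hx
  have := List.mem_takeWhile_imp hx
  simpa using this

-- the count of the head of a sorted list is 1 + the length of its leading block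
theorem pv_count_head {rest : List String} {r : String}
    (hge : ∀ x ∈ rest, r ≤ x) (hp : rest.Pairwise (· ≤ ·)) :
    List.count r (r :: rest) = 1 + (rest.takeWhile (fun x => x == r)).length := by
  have hsplit : rest = rest.takeWhile (fun x => x == r) ++ rest.dropWhile (fun x => x == r) :=
    (List.takeWhile_append_dropWhile).symm
  have htake : List.count r (rest.takeWhile (fun x => x == r))
      = (rest.takeWhile (fun x => x == r)).length := by
    rw [List.count_eq_length]
    intro b hb
    exact (pv_takeWhile_eq b hb).symm
  have hdrop : List.count r (rest.dropWhile (fun x => x == r)) = 0 := by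
    rw [List.count_eq_zero]
    intro hmem
    exact pv_dropWhile_ne hge hp r hmem rfl
  have hrest : List.count r rest = (rest.takeWhile (fun x => x == r)).length := by
    conv_lhs => rw [hsplit]
    rw [List.count_append, htake, hdrop]
    omega
  rw [List.count_cons_self, hrest]
  omega

-- run-length scan of a sorted list = one entry per distinct element, with its count,
-- enumerated by any strictly increasing list with the same members
theorem pv_emitRuns_spec : ∀ (l ysl : List String),
    l.Pairwise (· ≤ ·) → ysl.Pairwise (· < ·) → (∀ k, k ∈ ysl ↔ k ∈ l) →
    pvEmitRuns l = ysl.map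
      (fun k => k ++ ": " ++ PySem.Int.toStr ((List.count k l : Nat) : Int)) := by
  intro l
  induction l using pvEmitRuns.induct with
  | case1 =>
      intro ysl _ _ hmem
      have : ysl = [] := List.eq_nil_iff_forall_not_mem.mpr (fun k hk => by simpa using (hmem k).mp hk)
      subst this
      simp [pvEmitRuns]
  | case2 r rest ih =>
      intro ysl hp hys hmem
      have hge : ∀ x ∈ rest, r ≤ x := (List.pairwise_cons.mp hp).1
      have hpr : rest.Pairwise (· ≤ ·) := List.Pairwise.of_cons hp
      have hr : r ∈ ysl := (hmem r).mpr (List.mem_cons_self ..)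
      obtain ⟨y, yt, rfl⟩ : ∃ y yt, ysl = y :: yt := by
        cases ysl with
        | nil => exact absurd hr (by simp)
        | cons y yt => exact ⟨y, yt, rfl⟩
      have hyr : y = r := by
        have h1 : r ≤ y := by
          have : y ∈ (r :: rest) := (hmem y).mp (List.mem_cons_self ..)
          rcases List.mem_cons.mp this with h | h
          · exact le_of_eq h.symm
          · exact hge y h
        rcases List.mem_cons.mp hr with h | h
        · exact h.symm
        · exact absurd ((List.pairwise_cons.mp hys).1 r h) (not_lt_of_ge h1)
      subst hyr
      have hsplit : rest = rest.takeWhile (fun x => x == y) ++ rest.dropWhile (fun x => x == y) :=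
        (List.takeWhile_append_dropWhile).symm
      have hymem : ∀ k ∈ yt, y < k := (List.pairwise_cons.mp hys).1
      have hmem' : ∀ k, k ∈ yt ↔ k ∈ rest.dropWhile (fun x => x == y) := by
        intro k
        constructor
        · intro hk
          have hky : k ≠ y := ne_of_gt (hymem k hk)
          have : k ∈ (y :: rest) := (hmem k).mp (List.mem_cons_of_mem _ hk)
          rcases List.mem_cons.mp this with h | h
          · exact absurd h hky
          · rw [hsplit] at h
            rcases List.mem_append.mp h with h | h
            · exact absurd (pv_takeWhile_eq k h) hky
            · exact h
        · intro hk
          have hky : k ≠ y := pv_dropWhile_ne hge hpr k hk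
          have : k ∈ (y :: rest) :=
            List.mem_cons_of_mem _ ((List.dropWhile_sublist _).mem hk)
          rcases List.mem_cons.mp ((hmem k).mpr this) with h | h
          · exact absurd h hky
          · exact h
      have hcount : ∀ k ∈ yt, List.count k (rest.dropWhile (fun x => x == y)) = List.count k (y :: rest) := by
        intro k hk
        have hky : k ≠ y := ne_of_gt (hymem k hk)
        have htake0 : List.count k (rest.takeWhile (fun x => x == y)) = 0 := by
          rw [List.count_eq_zero]
          intro hmemt
          exact hky (pv_takeWhile_eq k hmemt)
        have hcons : List.count k (y :: rest) = List.count k rest := by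
          simp [Ne.symm hky]
        have hrest : List.count k rest
            = List.count k (rest.dropWhile (fun x => x == y)) := by
          conv_lhs => rw [hsplit]
          rw [List.count_append, htake0]
          omega
        rw [hcons, ← hrest]
      rw [pvEmitRuns]
      rw [ih yt (hpr.sublist (List.dropWhile_sublist _)) (List.Pairwise.of_cons hys) hmem']
      rw [List.map_cons]
      congr 1
      · rw [pv_count_head hge hpr]
      · apply List.map_congr_left
        intro k hk
        rw [hcount k hk]

-- ===== VERDICT (by name: the statement is the Claim_ definition above) =====
theorem pv_main (flagged : List (List (String × List String))) :
    summarize_risk_py flagged = summarize_risk_py_alt flagged := by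
  by_cases hf : flagged = []
  · simp [summarize_risk_py, summarize_risk_py_alt, hf]
  · simp only [summarize_risk_py, summarize_risk_py_alt, if_neg hf]
    set xs := flagged.flatMap (fun entry => (PySem.Dict.mk entry).getD "reasons" []) with hxs
    set ys := PySem.List.sorted (PySem.Set.ofList xs) (fun x => x) with hys
    set pairf : String → String × Int := fun k => (k, (List.count k xs : Int)) with hpairf
    have hA : flagged.foldl
        (fun d entry =>
          ((PySem.Dict.mk entry).getD "reasons" []).foldl
            (fun d reason => d.insert reason (d.getD reason 0 + 1)) d)
        PySem.Dict.empty = PySem.Dict.counter xs := by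
      rw [hxs, ← PySem.Dict.foldl_insert_getD_add_one_eq_counter, List.foldl_flatMap]
    rw [hA, PySem.Dict.items_counter]
    have hypairlt : List.Pairwise (fun a b => a.1 < b.1) (ys.map pairf) := by
      refine List.pairwise_map.mpr ?_
      refine (PySem.List.sorted_ofList_pairwise_lt xs).imp ?_
      intro a b h
      exact h
    have hinj : ∀ a ∈ (PySem.Set.ofList xs).map pairf, ∀ b ∈ (PySem.Set.ofList xs).map pairf,
        a.1 = b.1 → a = b := by
      intro a ha b hb hab
      obtain ⟨k1, _, rfl⟩ := List.mem_map.mp ha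
      obtain ⟨k2, _, rfl⟩ := List.mem_map.mp hb
      simp only [hpairf] at hab ⊢
      rw [hab]
    have h2 : PySem.List.sorted2 ((PySem.Set.ofList xs).map pairf) Prod.fst Prod.snd
        = ys.map pairf := by
      rw [pv_sorted2_eq_sorted_fst _ hinj]
      exact PySem.List.sorted_eq_of_perm_of_pairwise_lt _ _ _
        ((PySem.List.sorted_perm (PySem.Set.ofList xs) (fun x => x) false).map pairf) hypairlt
    rw [h2]
    have hB : pvEmitRuns (PySem.List.sorted xs (fun r => r))
        = ys.map (fun k => k ++ ": " ++ PySem.Int.toStr ((List.count k xs : Nat) : Int)) := by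
      have hmem : ∀ k, k ∈ ys ↔ k ∈ PySem.List.sorted xs (fun r => r) := by
        intro k
        rw [hys, PySem.List.mem_sorted, PySem.List.mem_sorted, PySem.Set.mem_ofList]
      rw [pv_emitRuns_spec _ ys (PySem.List.sorted_pairwise xs (fun r => r))
        (PySem.List.sorted_ofList_pairwise_lt xs) hmem]
      apply List.map_congr_left
      intro k _
      rw [(PySem.List.sorted_perm xs (fun r => r) false).count_eq]
    rw [hB, List.map_map]
    rfl

theorem summarize_risk_py_spec : Claim_equal_summarize_risk_py := by
  intro flagged _
  exact pv_main flagged
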